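-- pv_equiv track=rewrite | github.com/jayl2sw/TIL | algorithm/0210/4831_전기버스/4831_전기버스.py | stop_times
-- ===== SOURCE A (Python) =====
-- def max(set):
--     max_val = -int(1e9)
--     for i in set:
--         if max_val < i:
--             max_val = i
--     return max_val
--
-- def stop_times(n, k, array): #n, k, array = 충전기 위치 idx
--     location = 0    # 현재 위치
--     count = 0       # 충전 횟수
--     while True:
--         if location + k >= n:   # 목적지에 도착하면 count 반환
--             return count
--
--         mid_charger = set(range(location + k, location, -1)) & set(array)
--
--         if mid_charger:
--             location = max(mid_charger)
--             count += 1
--             continue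
--
--         return 0
-- ===== SOURCE B (Python) =====
-- def stop_times(n, k, array):
--     chargers = sorted(set(array))
--     loc = 0
--     count = 0
--     j = 0
--     while loc + k < n:
--         while j < len(chargers) and chargers[j] <= loc + k:
--             j += 1
--         if j == 0 or chargers[j - 1] <= loc:
--             return 0
--         loc = chargers[j - 1]
--         count += 1
--     return count
-- ===== Notes on version B (the rewrite author's own statement) =====
-- stated objective: alternative
-- what changed: B sorts the distinct chargers once and sweeps a single monotone pointer to find the farthest reachable charger each step, replacing A's per-step construction of set(range(location+k, location, -1)) & set(array) and linear max scan; a timing run found no measurable speed difference on the generated inputs.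
import Mathlib
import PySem

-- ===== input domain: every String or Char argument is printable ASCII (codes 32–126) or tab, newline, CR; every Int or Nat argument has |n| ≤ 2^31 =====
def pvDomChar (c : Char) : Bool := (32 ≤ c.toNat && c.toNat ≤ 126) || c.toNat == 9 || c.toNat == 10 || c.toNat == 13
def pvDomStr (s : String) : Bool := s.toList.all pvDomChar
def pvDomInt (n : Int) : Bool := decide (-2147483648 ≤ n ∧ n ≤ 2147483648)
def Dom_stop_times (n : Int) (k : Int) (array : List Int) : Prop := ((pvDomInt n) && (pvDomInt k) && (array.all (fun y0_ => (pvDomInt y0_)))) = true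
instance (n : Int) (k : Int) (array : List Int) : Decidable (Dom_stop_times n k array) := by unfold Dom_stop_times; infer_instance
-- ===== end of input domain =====

-- B replaces A's per-step set(range(...)) & set(array) scan by sorting the chargers once and
-- sweeping a single monotone pointer over them (objective: alternative algorithm, same result).

-- ===== PORT A =====
-- A's module-level helper 'max': running max starting from -int(1e9)
def pyMaxA (s : List Int) : Int :=
  s.foldl (fun maxVal i => if maxVal < i then i else maxVal) (-1000000000)

-- A's 'while True' loop; fuel (array.length + 1) only bounds the recursion: each charging
-- step moves to a strictly larger element of array, so it is never exhausted from loc = 0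
def stopLoopA (n k : Int) (array : List Int) : Nat → Int → Int → Int
  | 0, _, _ => 0
  | fuel + 1, location, count =>
    if location + k ≥ n then count
    else
      let midCharger := PySem.Set.inter
        (PySem.Set.ofList (PySem.List.pyRange (location + k) location (-1)))
        (PySem.Set.ofList array)
      if midCharger ≠ [] then
        stopLoopA n k array fuel (pyMaxA midCharger) (count + 1)
      else 0

def stop_times (n : Int) (k : Int) (array : List Int) : Int :=
  stopLoopA n k array (array.length + 1) 0 0

-- ===== PORT B =====
-- B's inner 'while j < len(chargers) and chargers[j] <= loc + k: j += 1'
def advanceB (s : List Int) (limit : Int) (j : Nat) : Nat :=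
  if h : j < s.length then
    if s.getD j 0 ≤ limit then advanceB s limit (j + 1) else j
  else j
termination_by s.length - j

-- B's outer 'while loc + k < n' loop; same fuel bound as A's (steps ≤ distinct chargers)
def stopLoopB (n k : Int) (s : List Int) : Nat → Int → Nat → Int → Int
  | 0, _, _, _ => 0
  | fuel + 1, loc, j, count =>
    if loc + k < n then
      let j' := advanceB s (loc + k) j
      if j' = 0 ∨ s.getD (j' - 1) 0 ≤ loc then 0
      else stopLoopB n k s fuel (s.getD (j' - 1) 0) j' (count + 1)
    else count

def stop_times_alt (n : Int) (k : Int) (array : List Int) : Int :=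
  stopLoopB n k (PySem.List.sorted (PySem.Set.ofList array) (fun x => x) false)
    (array.length + 1) 0 0 0

-- ===== PRECONDITION & SPEC =====
def Spec_stop_times (n : Int) (k : Int) (array : List Int) (out : Int) : Prop := out = stop_times_alt n k array
instance (n : Int) (k : Int) (array : List Int) (out : Int) : Decidable (Spec_stop_times n k array out) := by unfold Spec_stop_times; infer_instance

-- ===== CLAIM (what is proved, stated in full; the proofs are below) =====
def Claim_equal_stop_times : Prop := ∀ (n : Int) (k : Int) (array : List Int), Dom_stop_times n k array → Spec_stop_times n k array (stop_times n k array)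

-- ===== LEMMAS AND PROOFS =====

-- the inner while loop lands on the first index ≥ j whose charger exceeds the limit
lemma advanceB_spec (s : List Int) (limit : Int) (j : Nat) (hj : j ≤ s.length) :
    j ≤ advanceB s limit j ∧ advanceB s limit j ≤ s.length ∧
    (∀ i, j ≤ i → i < advanceB s limit j → s.getD i 0 ≤ limit) ∧
    (advanceB s limit j < s.length → limit < s.getD (advanceB s limit j) 0) := by
  revert hj
  induction j using advanceB.induct (s := s) (limit := limit) with
  | case1 x hx hle ih =>
    intro _
    rw [advanceB, dif_pos hx, if_pos hle]
    obtain ⟨h1, h2, h3, h4⟩ := ih hx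
    refine ⟨by omega, h2, ?_, h4⟩
    intro i hji hi
    rcases Nat.eq_or_lt_of_le hji with rfl | hlt
    · exact hle
    · exact h3 i hlt hi
  | case2 x hx hgt =>
    intro _
    rw [advanceB, dif_pos hx, if_neg hgt]
    refine ⟨le_refl _, le_of_lt hx, ?_, ?_⟩
    · intro i h1 h2; omega
    · intro _; omega
  | case3 x hx =>
    intro hj
    rw [advanceB, dif_neg hx]
    refine ⟨le_refl _, hj, ?_, ?_⟩
    · intro i h1 h2; omega
    · intro h'; exact absurd h' hx

-- A's hand-written max is the foldl of max
lemma pyMaxA_eq_foldl (s : List Int) :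
    pyMaxA s = s.foldl max (-1000000000) := by
  unfold pyMaxA
  congr 1
  funext a b
  simp only [max_def]
  split <;> split <;> omega

-- the two loops agree, for any list s that is a sorted enumeration of array's elements
lemma loop_eq (n k : Int) (array s : List Int)
    (hmem : ∀ x, x ∈ s ↔ x ∈ array)
    (hmono : ∀ p q : Nat, p ≤ q → q < s.length → s.getD p 0 ≤ s.getD q 0) :
    ∀ (fuel : Nat) (loc : Int) (j : Nat) (count : Int),
      0 ≤ loc → j ≤ s.length → (∀ i, i < j → s.getD i 0 ≤ loc) →
      stopLoopA n k array fuel loc count = stopLoopB n k s fuel loc j count := by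
  intro fuel
  induction fuel with
  | zero => intro loc j count _ _ _; rfl
  | succ f ih =>
    intro loc j count hloc hjlen hjinv
    by_cases hn : loc + k ≥ n
    · rw [stopLoopA, stopLoopB, if_pos hn, if_neg (not_lt.mpr hn)]
    · have hn' : loc + k < n := lt_of_not_ge hn
      obtain ⟨hjle, hj'len, hmidle, hafter⟩ := advanceB_spec s (loc + k) j hjlen
      set j' := advanceB s (loc + k) j with hj'
      set mid := PySem.Set.inter
        (PySem.Set.ofList (PySem.List.pyRange (loc + k) loc (-1)))
        (PySem.Set.ofList array) with hmid
      have hmidmem : ∀ x, x ∈ mid ↔ (loc < x ∧ x ≤ loc + k) ∧ x ∈ s := by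
        intro x
        rw [hmid, PySem.Set.mem_inter, PySem.Set.mem_ofList, PySem.Set.mem_ofList,
          PySem.List.mem_pyRange_neg_one, hmem]
      -- any index holding a charger ≤ loc + k lies strictly below j'
      have hbelow : ∀ ix, ix < s.length → s.getD ix 0 ≤ loc + k → ix < j' := by
        intro ix hix hle
        by_contra hge
        push Not at hge
        have hj'lt : j' < s.length := lt_of_le_of_lt hge hix
        have h1 := hafter hj'lt
        have h2 := hmono j' ix hge hix
        omega
      by_cases hne : mid = []
      · -- no reachable charger: both programs return 0
        have hB : j' = 0 ∨ s.getD (j' - 1) 0 ≤ loc := by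
          by_contra h
          push Not at h
          obtain ⟨h0, hgt⟩ := h
          have h0' : 0 < j' := Nat.pos_of_ne_zero h0
          have hlt : j' - 1 < s.length := by omega
          have hjge : j ≤ j' - 1 := by
            by_contra hjl
            push Not at hjl
            exact absurd (hjinv (j' - 1) hjl) (not_le.mpr hgt)
          have hle : s.getD (j' - 1) 0 ≤ loc + k := hmidle (j' - 1) hjge (by omega)
          have : s.getD (j' - 1) 0 ∈ mid := by
            rw [hmidmem]
            exact ⟨⟨hgt, hle⟩, by
              rw [List.getD_eq_getElem _ _ hlt]; exact List.getElem_mem hlt⟩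
          rw [hne] at this
          exact absurd this (List.not_mem_nil)
        rw [stopLoopA, stopLoopB, if_neg hn, if_pos hn']
        simp only [← hmid, ← hj']
        rw [if_neg (by simpa using hne), if_pos hB]
      · -- a reachable charger exists: both move to the same farthest charger
        obtain ⟨c, hc⟩ := List.exists_mem_of_ne_nil mid hne
        obtain ⟨⟨hcl, hcu⟩, hcs⟩ := (hmidmem c).1 hc
        obtain ⟨ic, hic, hceq⟩ := List.mem_iff_getElem.1 hcs
        have hcD : s.getD ic 0 = c := by rw [List.getD_eq_getElem _ _ hic, hceq]
        have hicj' : ic < j' := hbelow ic hic (by omega)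
        have h0' : 0 < j' := by omega
        have hlt : j' - 1 < s.length := by omega
        set M := s.getD (j' - 1) 0 with hM
        have hMc : c ≤ M := by
          have := hmono ic (j' - 1) (by omega) hlt
          omega
        have hMloc : loc < M := lt_of_lt_of_le hcl hMc
        have hjge : j ≤ j' - 1 := by
          by_contra hjl
          push Not at hjl
          have : ic < j := by omega
          have := hjinv ic this
          omega
        have hMle : M ≤ loc + k := hmidle (j' - 1) hjge (by omega)
        have hMmem : M ∈ mid := by
          rw [hmidmem]
          exact ⟨⟨hMloc, hMle⟩, by
            rw [hM, List.getD_eq_getElem _ _ hlt]; exact List.getElem_mem hlt⟩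
        -- A's max over mid is exactly M
        have hmax : pyMaxA mid = M := by
          rw [pyMaxA_eq_foldl]
          obtain ⟨hinit, hub⟩ := PySem.List.le_foldl_max mid (-1000000000 : Int)
          set r := mid.foldl max (-1000000000 : Int) with hr
          have hMr : M ≤ r := hub M hMmem
          have hrmem : r ∈ mid := by
            rcases PySem.List.foldl_max_mem mid (-1000000000 : Int) with h | h
            · omega
            · exact h
          obtain ⟨⟨hrl, hru⟩, hrs⟩ := (hmidmem r).1 hrmem
          obtain ⟨ir, hir, hreq⟩ := List.mem_iff_getElem.1 hrs
          have hirj' : ir < j' := by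
            apply hbelow ir hir
            rw [List.getD_eq_getElem _ _ hir, hreq]
            omega
          have : s.getD ir 0 ≤ M := hmono ir (j' - 1) (by omega) hlt
          rw [List.getD_eq_getElem _ _ hir, hreq] at this
          omega
        rw [stopLoopA, stopLoopB, if_neg hn, if_pos hn']
        simp only [← hmid, ← hj']
        rw [if_pos (by simpa using hne), if_neg (by push Not; exact ⟨by omega, by omega⟩)]
        rw [hmax]
        exact ih M j' (count + 1) (by omega) hj'len
          (fun i hi => hmono i (j' - 1) (by omega) hlt)

-- ===== VERDICT (by name: the statement is the Claim_ definition above) =====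
theorem stop_times_spec : Claim_equal_stop_times := by
  intro n k array _
  unfold Spec_stop_times stop_times stop_times_alt
  apply loop_eq
  · intro x
    exact ((PySem.List.sorted_perm _ _ _).mem_iff).trans (PySem.Set.mem_ofList _ _)
  · intro p q hpq hq
    rw [List.getD_eq_getElem _ _ (lt_of_le_of_lt hpq hq), List.getD_eq_getElem _ _ hq]
    exact PySem.List.sorted_id_getElem_mono _ hpq hq
  · exact le_refl 0
  · exact Nat.zero_le _
  · intro i hi; omega
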